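-- pv_equiv track=rewrite | github.com/jin-develop/algorithm | 프로그래머스/Level2/더맵게.py | solution
-- ===== SOURCE A (Python) =====
-- def solution(scoville, K):
--
--     cnt = 0
--     while True:
--         scoville.sort()
--         if scoville[0] >= K:
--             return cnt
--         if len(scoville) == 1:
--             if scoville[0] >= K:
--                 return cnt
--             else:
--                 return -1
--         elif len(scoville) == 2:
--             if scoville[0] + scoville[1] * 2>= K:
--                 cnt += 1
--                 return cnt
--             else:
--                 return -1
--         else:
--             cnt += 1
--             new1 = scoville[0] + scoville[1] * 2
--             del scoville[0]
--             del scoville[0]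
--             scoville.append(new1)
-- ===== SOURCE B (Python) =====
-- def solution(scoville, K):
--     # Two-queue Huffman-style algorithm: sort once, then keep a second FIFO
--     # queue of combined values; the overall minimum is always at the front of
--     # one of the two queues, so each round is O(1) after the initial sort.
--     # (Does not mutate the caller's list, unlike A; return value is identical.)
--     base = sorted(scoville)
--     made = []          # combined values, consumed front-to-back via index j
--     i = j = 0
--     cnt = 0
--
--     def pop():
--         nonlocal i, j
--         if j == len(made) or (i < len(base) and base[i] <= made[j]):
--             v = base[i]; i += 1
--         else:
--             v = made[j]; j += 1
--         return v
--
--     while True: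
--         a = pop()
--         if a >= K:
--             return cnt
--         if i == len(base) and j == len(made):
--             return -1
--         b = pop()
--         made.append(a + 2 * b)
--         cnt += 1
-- ===== Notes on version B (the rewrite author's own statement) =====
-- stated objective: faster
-- what changed: B replaces A's sort-the-whole-list-every-round loop with the two-queue Huffman technique: sort once, keep combined values in a FIFO queue (they can be consumed so that the overall minimum is always at one of the two queue fronts), so every round is O(1) instead of an O(n log n) re-sort.
import Mathlib
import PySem

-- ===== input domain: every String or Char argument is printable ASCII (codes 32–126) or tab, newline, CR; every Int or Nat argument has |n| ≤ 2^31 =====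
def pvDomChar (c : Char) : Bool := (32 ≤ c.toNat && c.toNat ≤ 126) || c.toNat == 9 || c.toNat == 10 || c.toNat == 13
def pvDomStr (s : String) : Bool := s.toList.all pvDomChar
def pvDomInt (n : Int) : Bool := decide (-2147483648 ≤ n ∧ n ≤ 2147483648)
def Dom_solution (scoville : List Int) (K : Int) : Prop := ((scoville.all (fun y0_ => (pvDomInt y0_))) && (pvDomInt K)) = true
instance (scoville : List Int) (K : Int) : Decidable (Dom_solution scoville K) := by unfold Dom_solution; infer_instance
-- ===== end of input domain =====

-- B replaces A's re-sort-every-round loop by the two-queue technique: sort once, keep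
-- combined values in a FIFO queue, the overall minimum is always at one of the two queue
-- fronts. A sorts its argument in place; the equivalence proved here is about the RETURN
-- value only (B does not mutate the caller's list). Both loops are written with a fuel
-- counter (fuel = list length, a pure totality guard: each round either returns or
-- shrinks the remaining pool by one, so the fuel never runs out).

-- ===== PORT A =====
-- while True: sort; check head / length-1 / length-2 cases; else combine the two
-- smallest (del, del, append) and loop.  scoville[0] raises IndexError on [], so the
-- [] arm's value 0 is unreachable under Pre_solution (and so is fuel 0).
def solutionGo : Nat → List Int → Int → Int → Int
  | 0, _, _, _ => 0
  | fuel + 1, l, K, cnt =>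
    match PySem.List.sorted l (fun x => x) false with
    | [] => 0
    | [a] => if a ≥ K then cnt else if a ≥ K then cnt else -1
    | [a, b] => if a ≥ K then cnt else if a + b * 2 ≥ K then cnt + 1 else -1
    | a :: b :: c :: rest =>
        if a ≥ K then cnt
        else solutionGo fuel (c :: rest ++ [a + b * 2]) K (cnt + 1)

def solution (scoville : List Int) (K : Int) : Int := solutionGo scoville.length scoville K 0

-- ===== PORT B =====
-- Source B's pop(): take the front of base (consumed via index i) or of made (consumed via
-- index j), whichever is smaller; returns the popped value and the updated indices.
-- base[i] / made[j] are read only under the guards Source B checks; the getD default 0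
-- stands for Source B's IndexError on an empty pool (unreachable under Pre_solution).
def popIdx (base made : List Int) (i j : Nat) : Int × Nat × Nat :=
  if j = made.length ∨ (i < base.length ∧ base.getD i 0 ≤ made.getD j 0)
  then (base.getD i 0, i + 1, j) else (made.getD j 0, i, j + 1)

-- Source B's while loop: pop a, check the two exits, pop b, append a + 2*b to made.
def solutionAltGo : Nat → List Int → Nat → List Int → Nat → Int → Int → Int
  | 0, _, _, _, _, _, _ => 0
  | fuel + 1, base, i, made, j, K, cnt =>
    let p1 := popIdx base made i j
    if p1.1 ≥ K then cnt
    else if p1.2.1 = base.length ∧ p1.2.2 = made.length then -1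
    else
      let p2 := popIdx base made p1.2.1 p1.2.2
      solutionAltGo fuel base p2.2.1 (made ++ [p1.1 + 2 * p2.1]) p2.2.2 K (cnt + 1)

def solution_alt (scoville : List Int) (K : Int) : Int :=
  solutionAltGo scoville.length (PySem.List.sorted scoville (fun x => x) false) 0 [] 0 K 0

-- ===== PRECONDITION & SPEC =====
-- Pre_ excludes only the empty list, on which both A and B raise IndexError (scoville[0] / base[i])
def Pre_solution (scoville : List Int) (K : Int) : Prop := scoville ≠ []
instance (scoville : List Int) (K : Int) : Decidable (Pre_solution scoville K) := by
  unfold Pre_solution; infer_instance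

def pvWitness_solution : List Int × Int := ([2, 1, 3, 9], 7)

def Spec_solution (scoville : List Int) (K : Int) (out : Int) : Prop := out = solution_alt scoville K
instance (scoville : List Int) (K : Int) (out : Int) : Decidable (Spec_solution scoville K out) := by
  unfold Spec_solution; infer_instance

-- ===== CLAIM (what is proved, stated in full; the proofs are below) =====
def Claim_equal_solution : Prop := ∀ (scoville : List Int) (K : Int), Dom_solution scoville K → Pre_solution scoville K → Spec_solution scoville K (solution scoville K)

-- ===== LEMMAS AND PROOFS =====

-- abstract one-element pop, Source B's pop() on the not-yet-consumed tails of the two queues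
def pvPop (Bq Mq : List Int) : Int × List Int × List Int :=
  match Bq, Mq with
  | [], [] => (0, [], [])
  | x :: B, [] => (x, B, [])
  | [], y :: M => (y, [], M)
  | x :: B, y :: M => if x ≤ y then (x, B, y :: M) else (y, x :: B, M)

-- loop invariant: after popping the two smallest, every combined value still queued
-- is at most the value about to be appended
def pvInv (Bq Mq : List Int) : Prop :=
  ∀ m ∈ (pvPop (pvPop Bq Mq).2.1 (pvPop Bq Mq).2.2).2.2,
    m ≤ (pvPop Bq Mq).1 + 2 * (pvPop (pvPop Bq Mq).2.1 (pvPop Bq Mq).2.2).1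

theorem pvPop_perm (Bq Mq : List Int) (h : ¬(Bq = [] ∧ Mq = [])) :
    ((pvPop Bq Mq).1 :: ((pvPop Bq Mq).2.1 ++ (pvPop Bq Mq).2.2)).Perm (Bq ++ Mq) := by
  match Bq, Mq with
  | [], [] => exact absurd ⟨rfl, rfl⟩ h
  | x :: B, [] => simp [pvPop]
  | [], y :: M => simp [pvPop]
  | x :: B, y :: M =>
    by_cases hxy : x ≤ y
    · simp [pvPop, hxy]
    · simpa [pvPop, hxy] using (List.perm_middle (a := y) (l₁ := x :: B) (l₂ := M)).symm

theorem pvPop_min (Bq Mq : List Int) (hB : Bq.Pairwise (· ≤ ·)) (hM : Mq.Pairwise (· ≤ ·))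
    (h : ¬(Bq = [] ∧ Mq = [])) : ∀ x ∈ Bq ++ Mq, (pvPop Bq Mq).1 ≤ x := by
  match Bq, Mq with
  | [], [] => exact absurd ⟨rfl, rfl⟩ h
  | x :: B, [] =>
    intro z hz
    simp [pvPop] at hz ⊢
    rcases hz with rfl | hz
    · rfl
    · exact List.rel_of_pairwise_cons hB hz
  | [], y :: M =>
    intro z hz
    simp [pvPop] at hz ⊢
    rcases hz with rfl | hz
    · rfl
    · exact List.rel_of_pairwise_cons hM hz
  | x :: B, y :: M =>
    intro z hz
    by_cases hxy : x ≤ y <;> simp [pvPop, hxy] at hz ⊢ <;>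
      rcases hz with rfl | hz | rfl | hz
    · rfl
    · exact List.rel_of_pairwise_cons hB hz
    · exact hxy
    · exact le_trans hxy (List.rel_of_pairwise_cons hM hz)
    · exact le_of_not_ge hxy
    · exact le_trans (le_of_not_ge hxy) (List.rel_of_pairwise_cons hB hz)
    · rfl
    · exact List.rel_of_pairwise_cons hM hz

-- shape of a pop: either the front of Bq (made queue untouched) or the front of Mq
theorem pvPop_spec (Bq Mq : List Int) (h : ¬(Bq = [] ∧ Mq = [])) :
    ((pvPop Bq Mq).1 ∈ Bq ∧ (pvPop Bq Mq).2.1 = Bq.tail ∧ (pvPop Bq Mq).2.2 = Mq) ∨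
    ((pvPop Bq Mq).1 :: (pvPop Bq Mq).2.2 = Mq ∧ (pvPop Bq Mq).2.1 = Bq) := by
  match Bq, Mq with
  | [], [] => exact absurd ⟨rfl, rfl⟩ h
  | x :: B, [] => left; simp [pvPop]
  | [], y :: M => right; simp [pvPop]
  | x :: B, y :: M =>
    by_cases hxy : x ≤ y
    · left; simp [pvPop, hxy]
    · right; simp [pvPop, hxy]

theorem pvPop_sorted (Bq Mq : List Int) (hB : Bq.Pairwise (· ≤ ·)) (hM : Mq.Pairwise (· ≤ ·)) :
    (pvPop Bq Mq).2.1.Pairwise (· ≤ ·) ∧ (pvPop Bq Mq).2.2.Pairwise (· ≤ ·) := by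
  by_cases h : Bq = [] ∧ Mq = []
  · obtain ⟨rfl, rfl⟩ := h; simp [pvPop]
  · rcases pvPop_spec Bq Mq h with ⟨_, h2, h3⟩ | ⟨h2, h3⟩
    · rw [h2, h3]
      refine ⟨?_, hM⟩
      cases Bq with
      | nil => simp
      | cons x B => exact (List.pairwise_cons.mp hB).2
    · rw [h3]
      refine ⟨hB, ?_⟩
      have hsub := List.sublist_cons_self (pvPop Bq Mq).1 (pvPop Bq Mq).2.2
      rw [h2] at hsub
      exact hM.sublist hsub

-- the popped value is a member of the pool
theorem pvPop_mem (Bq Mq : List Int) (h : ¬(Bq = [] ∧ Mq = [])) :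
    (pvPop Bq Mq).1 ∈ Bq ++ Mq := by
  rcases pvPop_spec Bq Mq h with ⟨h1, _, _⟩ | ⟨h2, _⟩
  · exact List.mem_append_left _ h1
  · have hm := List.mem_cons_self (a := (pvPop Bq Mq).1) (l := (pvPop Bq Mq).2.2)
    rw [h2] at hm
    exact List.mem_append_right _ hm

-- sorted(l) of a pool starts with the popped minimum
theorem sorted_pop (l Bq Mq : List Int) (hB : Bq.Pairwise (· ≤ ·)) (hM : Mq.Pairwise (· ≤ ·))
    (hp : l.Perm (Bq ++ Mq)) (h : ¬(Bq = [] ∧ Mq = [])) :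
    PySem.List.sorted l (fun x => x) false
      = (pvPop Bq Mq).1 :: PySem.List.sorted ((pvPop Bq Mq).2.1 ++ (pvPop Bq Mq).2.2) (fun x => x) false := by
  have hsp := PySem.List.sorted_perm (xs := (pvPop Bq Mq).2.1 ++ (pvPop Bq Mq).2.2)
      (key := fun x : Int => x) (rev := false)
  have hspw := PySem.List.sorted_pairwise (xs := (pvPop Bq Mq).2.1 ++ (pvPop Bq Mq).2.2)
      (key := fun x : Int => x)
  apply PySem.List.sorted_id_eq_of_perm_of_pairwise
  · exact (hsp.cons _).trans ((pvPop_perm Bq Mq h).trans hp.symm)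
  · rw [List.pairwise_cons]
    constructor
    · intro y hy
      rw [PySem.List.mem_sorted] at hy
      have hyu : y ∈ Bq ++ Mq := (pvPop_perm Bq Mq h).mem_iff.mp (List.mem_cons_of_mem _ hy)
      exact pvPop_min Bq Mq hB hM h y hyu
    · simpa using hspw

-- invariant preservation: the appended combined value keeps the made queue sorted
-- and re-establishes the invariant for the next round
theorem pvInv_step (Bq Mq : List Int) (a b : Int) (B1 M1 B2 M2 : List Int)
    (hB : Bq.Pairwise (· ≤ ·)) (hM : Mq.Pairwise (· ≤ ·))
    (hInv : pvInv Bq Mq) (h1 : ¬(Bq = [] ∧ Mq = []))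
    (e1 : pvPop Bq Mq = (a, B1, M1)) (h2 : ¬(B1 = [] ∧ M1 = []))
    (e2 : pvPop B1 M1 = (b, B2, M2)) :
    (M2 ++ [a + 2 * b]).Pairwise (· ≤ ·) ∧ pvInv B2 (M2 ++ [a + 2 * b]) := by
  have hB1M1 := pvPop_sorted Bq Mq hB hM
  rw [e1] at hB1M1
  obtain ⟨hB1, hM1⟩ := hB1M1
  have hB2M2 := pvPop_sorted B1 M1 hB1 hM1
  rw [e2] at hB2M2
  obtain ⟨hB2, hM2⟩ := hB2M2
  have amin : ∀ x ∈ Bq ++ Mq, a ≤ x := by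
    have := pvPop_min Bq Mq hB hM h1; rw [e1] at this; exact this
  have bmin : ∀ x ∈ B1 ++ M1, b ≤ x := by
    have := pvPop_min B1 M1 hB1 hM1 h2; rw [e2] at this; exact this
  have bmem : b ∈ B1 ++ M1 := by
    have := pvPop_mem B1 M1 h2; rw [e2] at this; exact this
  have hperm1 : (a :: (B1 ++ M1)).Perm (Bq ++ Mq) := by
    have := pvPop_perm Bq Mq h1; rw [e1] at this; exact this
  have hperm2 : (b :: (B2 ++ M2)).Perm (B1 ++ M1) := by
    have := pvPop_perm B1 M1 h2; rw [e2] at this; exact this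
  have hab : a ≤ b := amin b (hperm1.subset (List.mem_cons_of_mem a bmem))
  have b2min : ∀ x ∈ B2 ++ M2, b ≤ x := fun x hx =>
    bmin x (hperm2.subset (List.mem_cons_of_mem b hx))
  have hm2c : ∀ m ∈ M2, m ≤ a + 2 * b := by
    unfold pvInv at hInv
    rw [e1] at hInv
    dsimp only at hInv
    rw [e2] at hInv
    dsimp only at hInv
    exact hInv
  refine ⟨?_, ?_⟩
  · refine List.pairwise_append.mpr ⟨hM2, by simp, ?_⟩
    intro x hx y hy
    simp only [List.mem_singleton] at hy
    subst hy
    exact hm2c x hx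
  · intro m hm
    rcases hP3 : pvPop B2 (M2 ++ [a + 2 * b]) with ⟨a', B3, M3⟩
    rw [hP3] at hm
    dsimp only at hm
    rcases hP4 : pvPop B3 M3 with ⟨b', B4, M4⟩
    rw [hP4] at hm
    dsimp only at hm
    by_cases hE : B3 = [] ∧ M3 = []
    · obtain ⟨e3, e4⟩ := hE
      rw [e3, e4] at hP4
      simp only [pvPop, Prod.mk.injEq] at hP4
      obtain ⟨-, -, h44⟩ := hP4
      rw [← h44] at hm
      simp at hm
    · have hs1 := pvPop_spec B2 (M2 ++ [a + 2 * b]) (by simp)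
      rw [hP3] at hs1
      have hs2 := pvPop_spec B3 M3 hE
      rw [hP4] at hs2
      simp only at hs1 hs2
      have memM2 : ∀ x, x ∈ M2 ∨ x = a + 2 * b → x ≤ a + 2 * b := by
        intro x hx
        rcases hx with hx | rfl
        · exact hm2c x hx
        · omega
      rcases hs1 with ⟨ha'B2, hB3, hM3⟩ | ⟨hcons1, hB3⟩ <;>
        rcases hs2 with ⟨hb'B3, hB4, hM4⟩ | ⟨hcons2, hB4⟩
      · -- both pops from the base side
        have ha' : b ≤ a' := b2min a' (List.mem_append_left _ ha'B2)
        have hb' : b ≤ b' := by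
          refine b2min b' (List.mem_append_left _ ?_)
          rw [hB3] at hb'B3
          exact (List.tail_sublist B2).subset hb'B3
        have hmc : m ≤ a + 2 * b := by
          rw [hM4, hM3] at hm
          rcases List.mem_append.mp hm with h | h
          · exact hm2c m h
          · simp only [List.mem_singleton] at h; omega
        omega
      · -- first pop from base, second from the made queue
        rw [hM3] at hcons2
        have ha' : b ≤ a' := b2min a' (List.mem_append_left _ ha'B2)
        cases M2 with
        | nil =>
          simp at hcons2
          rw [hcons2.2] at hm
          simp at hm
        | cons m0 M2' =>
          simp only [List.cons_append, List.cons.injEq] at hcons2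
          obtain ⟨rfl, hM4'⟩ := hcons2
          have hb' : b ≤ b' := b2min b' (List.mem_append_right _ List.mem_cons_self)
          have hmc : m ≤ a + 2 * b := by
            rw [hM4'] at hm
            rcases List.mem_append.mp hm with h | h
            · exact hm2c m (List.mem_cons_of_mem _ h)
            · simp only [List.mem_singleton] at h; omega
          omega
      · -- first pop from the made queue, second from base
        cases M2 with
        | nil =>
          simp at hcons1
          rw [hM4, hcons1.2] at hm
          simp at hm
        | cons m0 M2' =>
          simp only [List.cons_append, List.cons.injEq] at hcons1
          obtain ⟨rfl, hM3'⟩ := hcons1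
          have ha' : b ≤ a' := b2min a' (List.mem_append_right _ List.mem_cons_self)
          have hb' : b ≤ b' := by
            refine b2min b' (List.mem_append_left _ ?_)
            rw [hB3] at hb'B3
            exact hb'B3
          have hmc : m ≤ a + 2 * b := by
            rw [hM4, hM3'] at hm
            rcases List.mem_append.mp hm with h | h
            · exact hm2c m (List.mem_cons_of_mem _ h)
            · simp only [List.mem_singleton] at h; omega
          omega
      · -- both pops from the made queue
        cases M2 with
        | nil =>
          simp at hcons1
          rw [hcons1.2] at hcons2
          simp at hcons2
        | cons m0 M2' =>
          simp only [List.cons_append, List.cons.injEq] at hcons1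
          obtain ⟨rfl, hM3'⟩ := hcons1
          have ha' : b ≤ a' := b2min a' (List.mem_append_right _ List.mem_cons_self)
          rw [hM3'] at hcons2
          cases M2' with
          | nil =>
            simp at hcons2
            rw [hcons2.2] at hm
            simp at hm
          | cons m1 M2'' =>
            simp only [List.cons_append, List.cons.injEq] at hcons2
            obtain ⟨rfl, hM4'⟩ := hcons2
            have hb' : b ≤ b' := b2min b'
              (List.mem_append_right _ (List.mem_cons_of_mem _ List.mem_cons_self))
            have hmc : m ≤ a + 2 * b := by
              rw [hM4'] at hm
              rcases List.mem_append.mp hm with h | h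
              · exact hm2c m (List.mem_cons_of_mem _ (List.mem_cons_of_mem _ h))
              · simp only [List.mem_singleton] at h; omega
            omega

-- index-level pop (the port's popIdx) computes the abstract pop on the dropped tails
theorem popIdx_bridge (base made : List Int) (i j : Nat) (hi : i ≤ base.length)
    (hj : j ≤ made.length) (hne : ¬(base.drop i = [] ∧ made.drop j = [])) :
    (popIdx base made i j).1 = (pvPop (base.drop i) (made.drop j)).1 ∧
    base.drop (popIdx base made i j).2.1 = (pvPop (base.drop i) (made.drop j)).2.1 ∧
    made.drop (popIdx base made i j).2.2 = (pvPop (base.drop i) (made.drop j)).2.2 ∧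
    (popIdx base made i j).2.1 ≤ base.length ∧ (popIdx base made i j).2.2 ≤ made.length := by
  rcases hBq : base.drop i with _ | ⟨x, B⟩ <;> rcases hMq : made.drop j with _ | ⟨y, M⟩
  · exact absurd ⟨hBq, hMq⟩ hne
  · -- base exhausted, made front y
    have hi' : i = base.length := le_antisymm hi (List.drop_eq_nil_iff.mp hBq)
    have hjlt : j < made.length := by
      have := congrArg List.length hMq
      simp [List.length_drop] at this; omega
    have hy : made.getD j 0 = y := by
      have hq : made[j]? = some y := by
        have := (List.getElem?_drop (xs := made) (i := j) (j := 0)).symm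
        simpa [hMq] using this
      simp [List.getD_eq_getElem?_getD, hq]
    have hcond : ¬(j = made.length ∨ (i < base.length ∧ base.getD i 0 ≤ made.getD j 0)) := by
      push_neg
      exact ⟨by omega, fun hlt => absurd hlt (by omega)⟩
    have hred : popIdx base made i j = (made.getD j 0, i, j + 1) := by
      rw [popIdx, if_neg hcond]
    rw [hred]
    have hdj : made.drop (j + 1) = M := by rw [← List.tail_drop, hMq]; rfl
    exact ⟨by simp only [hBq, hMq, pvPop]; try exact hy,
           by simp only [hBq, hMq, pvPop]; try exact hBq,
           by simp only [hBq, hMq, pvPop]; try exact hdj,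
           hi, by show j + 1 ≤ made.length; omega⟩
  · -- made exhausted, base front x
    have hj' : j = made.length := le_antisymm hj (List.drop_eq_nil_iff.mp hMq)
    have hx : base.getD i 0 = x := by
      have hq : base[i]? = some x := by
        have := (List.getElem?_drop (xs := base) (i := i) (j := 0)).symm
        simpa [hBq] using this
      simp [List.getD_eq_getElem?_getD, hq]
    have hred : popIdx base made i j = (base.getD i 0, i + 1, j) := by
      rw [popIdx, if_pos (Or.inl hj')]
    have hilt : i < base.length := by
      have := congrArg List.length hBq
      simp [List.length_drop] at this; omega
    rw [hred]
    have hdi : base.drop (i + 1) = B := by rw [← List.tail_drop, hBq]; rfl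
    exact ⟨by simp only [hBq, hMq, pvPop]; try exact hx,
           by simp only [hBq, hMq, pvPop]; try exact hdi,
           by simp only [hBq, hMq, pvPop]; try exact hMq,
           by show i + 1 ≤ base.length; omega, hj⟩
  · -- both fronts present
    have hjlt : j < made.length := by
      have := congrArg List.length hMq
      simp [List.length_drop] at this; omega
    have hilt : i < base.length := by
      have := congrArg List.length hBq
      simp [List.length_drop] at this; omega
    have hx : base.getD i 0 = x := by
      have hq : base[i]? = some x := by
        have := (List.getElem?_drop (xs := base) (i := i) (j := 0)).symm
        simpa [hBq] using this
      simp [List.getD_eq_getElem?_getD, hq]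
    have hy : made.getD j 0 = y := by
      have hq : made[j]? = some y := by
        have := (List.getElem?_drop (xs := made) (i := j) (j := 0)).symm
        simpa [hMq] using this
      simp [List.getD_eq_getElem?_getD, hq]
    by_cases hxy : x ≤ y
    · have hred : popIdx base made i j = (base.getD i 0, i + 1, j) := by
        rw [popIdx, if_pos (Or.inr ⟨hilt, by rw [hx, hy]; exact hxy⟩)]
      rw [hred]
      have hdi : base.drop (i + 1) = B := by rw [← List.tail_drop, hBq]; rfl
      exact ⟨by simp only [hBq, hMq, pvPop, if_pos hxy]; try exact hx,
             by simp only [hBq, hMq, pvPop, if_pos hxy]; try exact hdi,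
             by simp only [hBq, hMq, pvPop, if_pos hxy]; try exact hMq,
             by show i + 1 ≤ base.length; omega, hj⟩
    · have hcond : ¬(j = made.length ∨ (i < base.length ∧ base.getD i 0 ≤ made.getD j 0)) := by
        push_neg
        refine ⟨by omega, fun _ => ?_⟩
        rw [hx, hy]; omega
      have hred : popIdx base made i j = (made.getD j 0, i, j + 1) := by
        rw [popIdx, if_neg hcond]
      rw [hred]
      have hdj : made.drop (j + 1) = M := by rw [← List.tail_drop, hMq]; rfl
      exact ⟨by simp only [hBq, hMq, pvPop, if_neg hxy]; try exact hy,
             by simp only [hBq, hMq, pvPop, if_neg hxy]; try exact hBq,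
             by simp only [hBq, hMq, pvPop, if_neg hxy]; try exact hdj,
             hi, by show j + 1 ≤ made.length; omega⟩

-- the invariant holds trivially while the made queue is empty
theorem pvInv_nil (Bq : List Int) : pvInv Bq [] := by
  match Bq with
  | [] => intro m hm; simp [pvPop] at hm
  | [x] => intro m hm; simp [pvPop] at hm
  | x :: y :: B => intro m hm; simp [pvPop] at hm

-- main loop equivalence
theorem go_eq : ∀ (fa fb : Nat) (base made : List Int) (i j : Nat) (K cnt : Int) (l : List Int),
    i ≤ base.length → j ≤ made.length →
    (base.drop i).Pairwise (· ≤ ·) → (made.drop j).Pairwise (· ≤ ·) →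
    pvInv (base.drop i) (made.drop j) →
    l.Perm (base.drop i ++ made.drop j) → l ≠ [] →
    l.length ≤ fa → l.length ≤ fb →
    solutionGo fa l K cnt = solutionAltGo fb base i made j K cnt := by
  intro fa
  induction fa with
  | zero =>
    intro fb base made i j K cnt l _ _ _ _ _ _ hne hfa _
    cases l with
    | nil => exact absurd rfl hne
    | cons _ _ => simp at hfa
  | succ n ih =>
    intro fb base made i j K cnt l hi hj hB hM hInv hp hne hfa hfb
    obtain ⟨fb', rfl⟩ : ∃ m, fb = m + 1 := by
      cases l with
      | nil => exact absurd rfl hne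
      | cons _ _ =>
        cases fb with
        | zero => simp at hfb
        | succ m => exact ⟨m, rfl⟩
    have hlen : (PySem.List.sorted l (fun x => x) false).length = l.length :=
      PySem.List.length_sorted l (fun x => x) false
    have hne2 : ¬(base.drop i = [] ∧ made.drop j = []) := by
      rintro ⟨eB, eM⟩
      rw [eB, eM] at hp
      simp at hp
      exact hne hp
    obtain ⟨hv1, hd1B, hd1M, hle1B, hle1M⟩ := popIdx_bridge base made i j hi hj hne2
    have hsort := sorted_pop l (base.drop i) (made.drop j) hB hM hp hne2
    have hBM1 := pvPop_sorted (base.drop i) (made.drop j) hB hM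
    rcases hq1 : pvPop (base.drop i) (made.drop j) with ⟨a, B1, M1⟩
    rw [hq1] at hv1 hd1B hd1M hsort hBM1
    dsimp only at hv1 hd1B hd1M hsort hBM1
    obtain ⟨hB1, hM1⟩ := hBM1
    rw [solutionGo, solutionAltGo]
    rcases hr1 : popIdx base made i j with ⟨a1, i1, j1⟩
    rw [hr1] at hv1 hd1B hd1M hle1B hle1M
    dsimp only at hv1 hd1B hd1M hle1B hle1M ⊢
    rw [hv1]
    rcases hs1 : PySem.List.sorted (B1 ++ M1) (fun x => x) false with _ | ⟨b2, t⟩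
    · -- the pool had one element: both return cnt or -1
      have hBM : B1 ++ M1 = [] := (PySem.List.sorted_eq_nil_iff _ _ _).mp hs1
      have hB1e : B1 = [] := by
        cases hBM' : B1 with
        | nil => rfl
        | cons _ _ => rw [hBM'] at hBM; simp at hBM
      have hM1e : M1 = [] := by
        rw [hB1e] at hBM; simpa using hBM
      have hi1 : i1 = base.length := by
        rw [hB1e] at hd1B
        have := List.drop_eq_nil_iff.mp hd1B
        omega
      have hj1 : j1 = made.length := by
        rw [hM1e] at hd1M
        have := List.drop_eq_nil_iff.mp hd1M
        omega
      rw [hsort, hs1]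
      by_cases hK : a ≥ K <;> simp [hK, hi1, hj1]
    · -- at least two elements: pop b as well
      have hne3 : ¬(B1 = [] ∧ M1 = []) := by
        rintro ⟨eB, eM⟩
        rw [eB, eM] at hs1
        simp [PySem.List.sorted] at hs1
      obtain ⟨hv2, hd2B, hd2M, hle2B, hle2M⟩ :=
        popIdx_bridge base made i1 j1 hle1B hle1M (by rw [hd1B, hd1M]; exact hne3)
      have hsort2 := sorted_pop (B1 ++ M1) B1 M1 hB1 hM1 (List.Perm.refl _) hne3
      have hstep := pvInv_step (base.drop i) (made.drop j) a b2
      rcases hq2 : pvPop B1 M1 with ⟨b, B2, M2⟩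
      rw [hd1B, hd1M, hq2] at hv2 hd2B hd2M
      rw [hq2] at hsort2
      dsimp only at hv2 hd2B hd2M hsort2
      have hinv2 := pvInv_step (base.drop i) (made.drop j) a b B1 M1 B2 M2 hB hM hInv
        hne2 hq1 hne3 hq2
      have hBM2 := pvPop_sorted B1 M1 hB1 hM1
      rw [hq2] at hBM2
      obtain ⟨hB2, hM2⟩ := hBM2
      have hexit : ¬(i1 = base.length ∧ j1 = made.length) := by
        rintro ⟨e1, e2⟩
        apply hne3
        constructor
        · rw [← hd1B, e1]; simp
        · rw [← hd1M, e2]; simp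
      by_cases hK : a ≥ K
      · rw [hsort, hs1]
        rcases t with _ | ⟨c2, r⟩ <;> simp [hK]
      · rcases hr2 : popIdx base made i1 j1 with ⟨b1, i2, j2⟩
        rw [hr2] at hv2 hd2B hd2M hle2B hle2M
        dsimp only at hv2 hd2B hd2M hle2B hle2M ⊢
        rw [hv2]
        -- identify the second-smallest value
        obtain ⟨rfl, ht⟩ : b = b2 ∧ PySem.List.sorted (B2 ++ M2) (fun x => x) false = t := by
          have h := hsort2.symm.trans hs1
          simp only [List.cons.injEq] at h
          exact h
        have hdm2 : (made ++ [a + 2 * b]).drop j2 = M2 ++ [a + 2 * b] := by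
          rw [List.drop_append_of_le_length hle2M, hd2M]
        have hlen2 : l.length = t.length + 2 := by
          rw [← hlen, hsort, hsort2, ht]
          simp
        rcases hs2 : PySem.List.sorted (B2 ++ M2) (fun x => x) false with _ | ⟨c2, r⟩
        · -- exactly two elements: A answers directly, B loops once more on the combined value
          have hBM : B2 ++ M2 = [] := (PySem.List.sorted_eq_nil_iff _ _ _).mp hs2
          have hB2e : B2 = [] := by
            cases hBM' : B2 with
            | nil => rfl
            | cons _ _ => rw [hBM'] at hBM; simp at hBM
          have hM2e : M2 = [] := by
            rw [hB2e] at hBM; simpa using hBM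
          rw [hs2] at ht
          rw [hsort, hs1, ← ht]
          obtain ⟨fb'', rfl⟩ : ∃ m, fb' = m + 1 := by
            cases fb' with
            | zero => omega
            | succ m => exact ⟨m, rfl⟩
          -- unfold B one more round: the only element left is the combined value
          have hle3M : j2 ≤ (made ++ [a + 2 * b]).length := by
            simp only [List.length_append, List.length_cons, List.length_nil]
            omega
          obtain ⟨hv3, hd3B, hd3M, hle3B', hle3M'⟩ :=
            popIdx_bridge base (made ++ [a + 2 * b]) i2 j2 hle2B hle3M
              (by rw [hd2B, hdm2, hB2e, hM2e]; simp)
          rw [hd2B, hdm2, hB2e, hM2e] at hv3 hd3B hd3M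
          simp only [List.nil_append, pvPop] at hv3 hd3B hd3M
          rw [solutionAltGo]
          rcases hr3 : popIdx base (made ++ [a + 2 * b]) i2 j2 with ⟨c1, i3, j3⟩
          rw [hr3] at hv3 hd3B hd3M hle3B' hle3M'
          dsimp only at hv3 hd3B hd3M hle3B' hle3M' ⊢
          rw [hv3]
          have hi3 : i3 = base.length := by
            have := List.drop_eq_nil_iff.mp hd3B
            omega
          have hj3 : j3 = (made ++ [a + 2 * b]).length := by
            have := List.drop_eq_nil_iff.mp hd3M
            omega
          have harith : a + b * 2 = a + 2 * b := by ring
          rw [harith]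
          by_cases hK2 : a + 2 * b ≥ K <;> simp [hK, hK2, hi3, hj3, hexit]
        · -- three or more elements: both sides loop
          rw [hs2] at ht
          rw [hsort, hs1, ← ht]
          simp only [hK, ge_iff_le, if_false]
          rw [if_neg hexit]
          have harith : a + b * 2 = a + 2 * b := by ring
          refine ih fb' base (made ++ [a + 2 * b]) i2 j2 K (cnt + 1)
            (c2 :: r ++ [a + b * 2]) hle2B
            (by simp only [List.length_append, List.length_cons, List.length_nil]; omega)
            ?_ ?_ ?_ ?_ (by simp) ?_ ?_
          · rw [hd2B]; exact hB2
          · rw [hdm2]; exact hinv2.1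
          · rw [hd2B, hdm2]; exact hinv2.2
          · rw [hd2B, hdm2, harith]
            have hperm : (c2 :: r).Perm (B2 ++ M2) := by
              rw [← hs2]
              exact PySem.List.sorted_perm (B2 ++ M2) (fun x => x) false
            calc (c2 :: r ++ [a + 2 * b]).Perm ((B2 ++ M2) ++ [a + 2 * b]) :=
                  hperm.append_right _
              _ = B2 ++ (M2 ++ [a + 2 * b]) := by rw [List.append_assoc]
          · have : t.length = r.length + 1 := by rw [← ht]; simp
            simp only [List.cons_append, List.length_cons, List.length_append,
              List.length_cons, List.length_nil]
            omega
          · have : t.length = r.length + 1 := by rw [← ht]; simp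
            simp only [List.cons_append, List.length_cons, List.length_append,
              List.length_cons, List.length_nil]
            omega

-- ===== VERDICT (by name: the statement is the Claim_ definition above) =====
theorem solution_spec : Claim_equal_solution := by
  intro scoville K _ hpre
  unfold Spec_solution solution solution_alt
  refine go_eq scoville.length scoville.length (PySem.List.sorted scoville (fun x => x) false)
    [] 0 0 K 0 scoville (by simp) (by simp) ?_ (by simp) ?_ ?_ hpre (le_refl _) ?_
  · simpa using PySem.List.sorted_pairwise (xs := scoville) (key := fun x : Int => x)
  · simpa using pvInv_nil (PySem.List.sorted scoville (fun x => x) false)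
  · simpa using (PySem.List.sorted_perm (xs := scoville) (key := fun x : Int => x) (rev := false)).symm
  · simpa using le_of_eq (PySem.List.length_sorted (xs := scoville) (key := fun x : Int => x) (rev := false))
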